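-- pv_equiv track=rewrite | github.com/dndjd321/FreeFolder | pokemon_rl/backup_py/fetch_pokeapi.py | get_gen_range
-- ===== SOURCE A (Python) =====
-- GEN_RANGES = {
--     1: (1, 151),
--     2: (152, 251),
--     3: (252, 386),
--     4: (387, 493),
--     5: (494, 649),
--     6: (650, 721),
--     7: (722, 809),
--     8: (810, 905),
--     9: (906, 1025),
-- }
--
-- def get_gen_range(gen_str: str) -> list[int]:
--     """세대 문자열 → 포켓몬 ID 목록"""
--     if gen_str == "all":
--         ids = []
--         for start, end in GEN_RANGES.values():
--             ids.extend(range(start, end + 1))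
--         return ids
--     elif "-" in gen_str:
--         g1, g2 = gen_str.split("-")
--         ids = []
--         for g in range(int(g1), int(g2) + 1):
--             if g in GEN_RANGES:
--                 start, end = GEN_RANGES[g]
--                 ids.extend(range(start, end + 1))
--         return ids
--     else:
--         g = int(gen_str)
--         if g in GEN_RANGES:
--             start, end = GEN_RANGES[g]
--             return list(range(start, end + 1))
--     return list(range(1, 152))
-- ===== SOURCE B (Python) =====
-- GEN_RANGES = {
--     1: (1, 151),
--     2: (152, 251),
--     3: (252, 386),
--     4: (387, 493),
--     5: (494, 649),
--     6: (650, 721),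
--     7: (722, 809),
--     8: (810, 905),
--     9: (906, 1025),
-- }
--
-- def get_gen_range(gen_str: str) -> list[int]:
--     """세대 문자열 → 포켓몬 ID 목록 (closed-form ranges; GEN_RANGES is contiguous over 1..1025)"""
--     if gen_str == "all":
--         return list(range(1, 1026))
--     if "-" in gen_str:
--         g1, g2 = gen_str.split("-")
--         lo, hi = max(int(g1), 1), min(int(g2), 9)
--         if lo > hi:
--             return []
--         return list(range(GEN_RANGES[lo][0], GEN_RANGES[hi][1] + 1))
--     start, end = GEN_RANGES.get(int(gen_str), (1, 151))
--     return list(range(start, end + 1))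
-- ===== Notes on version B (the rewrite author's own statement) =====
-- stated objective: simpler
-- what changed: Each branch's loop that extends a list generation by generation is replaced by a single closed-form range, exploiting that GEN_RANGES is contiguous over 1..1025: the whole-Pokedex branch becomes one range literal, a dash span becomes one range from the clamped low generation's start to the clamped high generation's end, and the single-generation/fallback branch becomes one dict lookup with a default.
import Mathlib
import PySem

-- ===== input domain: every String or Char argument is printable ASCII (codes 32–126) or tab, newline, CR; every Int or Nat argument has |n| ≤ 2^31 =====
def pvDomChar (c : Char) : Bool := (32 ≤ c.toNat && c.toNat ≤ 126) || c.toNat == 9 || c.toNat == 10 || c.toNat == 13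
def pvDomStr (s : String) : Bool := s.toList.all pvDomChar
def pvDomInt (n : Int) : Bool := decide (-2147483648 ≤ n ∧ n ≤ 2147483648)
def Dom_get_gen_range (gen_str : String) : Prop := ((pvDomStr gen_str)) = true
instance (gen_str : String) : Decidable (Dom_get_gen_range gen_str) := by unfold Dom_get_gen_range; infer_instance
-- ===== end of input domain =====

-- B replaces every loop-and-extend of A by one closed-form contiguous range per branch (objective: simpler).


-- GEN_RANGES, the module-level dict of Source A
def genRanges : PySem.Dict Int (Int × Int) := PySem.Dict.ofList
  [(1,(1,151)),(2,(152,251)),(3,(252,386)),(4,(387,493)),(5,(494,649)),(6,(650,721)),(7,(722,809)),(8,(810,905)),(9,(906,1025))]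

-- ===== PORT A =====
def get_gen_range (gen_str : String) : List Int :=
  if gen_str = "all" then
    genRanges.values.foldl (fun ids (se : Int × Int) => ids ++ PySem.List.pyRange se.1 (se.2 + 1) 1) []
  else if PySem.Str.isIn "-" gen_str then
    match PySem.Chars.splitOn gen_str.toList ['-'] with
    | [t1, t2] =>
      match PySem.Int.ofChars? t1, PySem.Int.ofChars? t2 with
      | some g1, some g2 =>
          (PySem.List.pyRange g1 (g2 + 1) 1).foldl
            (fun ids g =>
              if genRanges.contains g then
                ids ++ PySem.List.pyRange (genRanges.getD g (0, 0)).1 ((genRanges.getD g (0, 0)).2 + 1) 1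
              else ids) []
      | _, _ => []   -- int() raises ValueError here; excluded by Pre_
    | _ => []        -- tuple unpacking raises ValueError here; excluded by Pre_
  else
    match PySem.Int.ofStr? gen_str with
    | some g =>
        if genRanges.contains g then
          PySem.List.pyRange (genRanges.getD g (0, 0)).1 ((genRanges.getD g (0, 0)).2 + 1) 1
        else PySem.List.pyRange 1 152 1
    | none => []     -- int() raises ValueError here; excluded by Pre_

-- ===== PORT B =====
-- GEN_RANGES, the module-level dict of Source B
def genRangesB : PySem.Dict Int (Int × Int) := PySem.Dict.ofList
  [(1,(1,151)),(2,(152,251)),(3,(252,386)),(4,(387,493)),(5,(494,649)),(6,(650,721)),(7,(722,809)),(8,(810,905)),(9,(906,1025))]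

def get_gen_range_alt (gen_str : String) : List Int :=
  if gen_str = "all" then PySem.List.pyRange 1 1026 1
  else if PySem.Str.isIn "-" gen_str then
    let parts := PySem.Chars.splitOn gen_str.toList ['-']
    if h : parts.length = 2 then    -- 'g1, g2 = gen_str.split("-")': any other arity raises ValueError (excluded by Pre_)
      ((PySem.Int.ofChars? (parts[0]'(by omega))).bind fun g1 =>
        (PySem.Int.ofChars? (parts[1]'(by omega))).map fun g2 =>
          let lo := max g1 1
          let hi := min g2 9
          if lo > hi then []
          else PySem.List.pyRange (genRangesB.getD lo (0, 0)).1 ((genRangesB.getD hi (0, 0)).2 + 1) 1).getD []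
      -- .getD [] is unreachable under Pre_: none = int() raises ValueError
    else []
  else
    ((PySem.Int.ofStr? gen_str).map fun g =>
      PySem.List.pyRange (genRangesB.getD g (1, 151)).1 ((genRangesB.getD g (1, 151)).2 + 1) 1).getD []
    -- .getD [] is unreachable under Pre_: none = int() raises ValueError

-- ===== PRECONDITION & SPEC =====
-- Pre_ excludes exactly the inputs where A raises ValueError: a dash string whose split is not
-- exactly two int()-parsable pieces, and a dash-free string (other than "all") that int() rejects.
def Pre_get_gen_range (gen_str : String) : Prop :=
  gen_str = "all" ∨
  (PySem.Str.isIn "-" gen_str = true ∧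
    (PySem.Chars.splitOn gen_str.toList ['-']).length = 2 ∧
    ((PySem.Chars.splitOn gen_str.toList ['-']).map PySem.Int.ofChars?).all Option.isSome = true) ∨
  (PySem.Str.isIn "-" gen_str = false ∧ (PySem.Int.ofStr? gen_str).isSome = true)
instance (gen_str : String) : Decidable (Pre_get_gen_range gen_str) := by unfold Pre_get_gen_range; infer_instance

def pvWitness_get_gen_range : String := "3-5"

def Spec_get_gen_range (gen_str : String) (out : List Int) : Prop := out = get_gen_range_alt gen_str
instance (gen_str : String) (out : List Int) : Decidable (Spec_get_gen_range gen_str out) := by unfold Spec_get_gen_range; infer_instance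

-- ===== CLAIM (what is proved, stated in full; the proofs are below) =====
def Claim_equal_get_gen_range : Prop := ∀ (gen_str : String), Dom_get_gen_range gen_str → Pre_get_gen_range gen_str → Spec_get_gen_range gen_str (get_gen_range gen_str)

-- ===== LEMMAS AND PROOFS =====

lemma genRangesB_eq : genRangesB = genRanges := by rfl

-- genRanges as a literal item list (for the contains/getD lemmas)
lemma genRanges_mk : genRanges = PySem.Dict.mk
    [(1,(1,151)),(2,(152,251)),(3,(252,386)),(4,(387,493)),(5,(494,649)),(6,(650,721)),(7,(722,809)),(8,(810,905)),(9,(906,1025))] := by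
  rfl

lemma genRanges_contains (g : Int) : genRanges.contains g = true ↔ 1 ≤ g ∧ g ≤ 9 := by
  rw [genRanges_mk]
  simp [PySem.Dict.contains_mk]
  omega

lemma genRanges_getD_out (g : Int) (h : ¬ (1 ≤ g ∧ g ≤ 9)) (d : Int × Int) : genRanges.getD g d = d := by
  rw [genRanges_mk]
  simp [PySem.Dict.getD, PySem.Dict.get?_mk_cons]
  split_ifs <;> first | omega | simp [PySem.Dict.get?]

lemma genRanges_getD_in (g : Int) (h : 1 ≤ g ∧ g ≤ 9) (d d' : Int × Int) :
    genRanges.getD g d = genRanges.getD g d' := by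
  obtain ⟨h1, h2⟩ := h
  interval_cases g <;> rfl

-- two strictly increasing Int lists with the same members are equal
lemma pairwise_lt_ext (l1 l2 : List Int) (h1 : l1.Pairwise (· < ·)) (h2 : l2.Pairwise (· < ·))
    (h : ∀ x, x ∈ l1 ↔ x ∈ l2) : l1 = l2 :=
  List.Perm.eq_of_pairwise (fun _ _ _ _ hab hba => absurd hba (lt_asymm hab)) h1 h2
    ((List.perm_ext_iff_of_nodup h1.nodup h2.nodup).mpr h)

-- A's guarded extend-loop as a flatMap
lemma foldl_append_guard (l : List Int) (p : Int → Bool) (f : Int → List Int) (acc : List Int) :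
    l.foldl (fun ids g => if p g then ids ++ f g else ids) acc =
      acc ++ l.flatMap (fun g => if p g then f g else []) := by
  induction l generalizing acc with
  | nil => simp
  | cons a t ih => by_cases h : p a = true <;> simp [h, ih]

-- a flatMap of an if-guarded body is a flatMap over the filter
lemma flatMap_ite_eq_filter (l : List Int) (p : Int → Bool) (f : Int → List Int) :
    l.flatMap (fun x => if p x then f x else []) = (l.filter p).flatMap f := by
  induction l with
  | nil => rfl
  | cons a t ih => by_cases h : p a = true <;> simp [h, ih]

-- filtering a contiguous range by dict membership clamps it to [1, 9]
lemma filter_range_contains (a b : Int) :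
    (PySem.List.pyRange a b 1).filter (fun g => genRanges.contains g) =
      PySem.List.pyRange (max a 1) (min b 10) 1 := by
  refine pairwise_lt_ext _ _ (List.Pairwise.filter _ (PySem.List.pairwise_lt_pyRange_one a b))
    (PySem.List.pairwise_lt_pyRange_one _ _) (fun x => ?_)
  simp [List.mem_filter, PySem.List.mem_pyRange_one, genRanges_contains]
  omega

-- the generation blocks are contiguous: flatMap over gens lo..hi is one range
set_option maxRecDepth 20000 in
set_option maxHeartbeats 4000000 in
lemma flatMap_blocks (lo hi : Int) (h1 : 1 ≤ lo) (h2 : hi ≤ 9) (h3 : lo ≤ hi) :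
    (PySem.List.pyRange lo (hi + 1) 1).flatMap
        (fun g => PySem.List.pyRange (genRanges.getD g (0, 0)).1 ((genRanges.getD g (0, 0)).2 + 1) 1) =
      PySem.List.pyRange (genRanges.getD lo (0, 0)).1 ((genRanges.getD hi (0, 0)).2 + 1) 1 := by
  have h4 : lo ≤ 9 := le_trans h3 h2
  have h5 : 1 ≤ hi := le_trans h1 h3
  interval_cases lo <;> interval_cases hi <;> rfl

-- A's dash loop equals B's closed-form range
lemma dash_eq (g1 g2 : Int) :
    (PySem.List.pyRange g1 (g2 + 1) 1).foldl
        (fun ids g =>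
          if genRanges.contains g then
            ids ++ PySem.List.pyRange (genRanges.getD g (0, 0)).1 ((genRanges.getD g (0, 0)).2 + 1) 1
          else ids) [] =
      (if max g1 1 > min g2 9 then []
       else PySem.List.pyRange (genRanges.getD (max g1 1) (0, 0)).1
              ((genRanges.getD (min g2 9) (0, 0)).2 + 1) 1) := by
  rw [foldl_append_guard, List.nil_append, flatMap_ite_eq_filter, filter_range_contains]
  have hmin : min (g2 + 1) 10 = min g2 9 + 1 := by omega
  rw [hmin]
  by_cases hc : max g1 1 > min g2 9
  · rw [if_pos hc, PySem.List.pyRange_one_eq_nil (by omega)]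
    simp
  · rw [if_neg hc]
    exact flatMap_blocks _ _ (by omega) (by omega) (by omega)

set_option maxRecDepth 20000 in
lemma all_eq :
    genRanges.values.foldl (fun ids (se : Int × Int) => ids ++ PySem.List.pyRange se.1 (se.2 + 1) 1) [] =
      PySem.List.pyRange 1 1026 1 := by rfl

lemma single_eq (g : Int) :
    (if genRanges.contains g then
        PySem.List.pyRange (genRanges.getD g (0, 0)).1 ((genRanges.getD g (0, 0)).2 + 1) 1
      else PySem.List.pyRange 1 152 1) =
      PySem.List.pyRange (genRanges.getD g (1, 151)).1 ((genRanges.getD g (1, 151)).2 + 1) 1 := by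
  by_cases h : 1 ≤ g ∧ g ≤ 9
  · rw [if_pos ((genRanges_contains g).mpr h), genRanges_getD_in g h (0, 0) (1, 151)]
  · rw [if_neg (by simp [genRanges_contains]; omega), genRanges_getD_out g h]
    norm_num

-- ===== VERDICT (by name: the statement is the Claim_ definition above) =====
theorem get_gen_range_spec : Claim_equal_get_gen_range := by
  intro s _ hPre
  unfold Spec_get_gen_range get_gen_range get_gen_range_alt
  rw [genRangesB_eq]
  rcases hPre with h | ⟨hin, hlen, hall⟩ | ⟨hnin, hsome⟩
  · subst h
    rw [if_pos rfl, if_pos rfl, all_eq]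
  · have hs : s ≠ "all" := by
      rintro rfl; exact absurd hin (by decide)
    rw [if_neg hs, if_neg hs, if_pos hin, if_pos hin]
    obtain ⟨t1, t2, hsp⟩ := List.length_eq_two.mp hlen
    rw [hsp] at hall
    simp [Option.isSome_iff_exists] at hall
    obtain ⟨⟨g1, hg1⟩, ⟨g2, hg2⟩⟩ := hall
    simp only [hsp, hg1, hg2, List.length_cons, List.length_nil, dite_true, Option.bind_some,
      Option.map_some, Option.getD_some, List.getElem_cons_zero, List.getElem_cons_succ]
    exact dash_eq g1 g2
  · have hs : s ≠ "all" := by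
      rintro rfl; exact absurd hsome (by decide)
    have hnin2 : ¬ (PySem.Str.isIn "-" s = true) := by simp only [hnin]; exact Bool.false_ne_true
    rw [if_neg hs, if_neg hs, if_neg hnin2, if_neg hnin2]
    rw [Option.isSome_iff_exists] at hsome
    obtain ⟨g, hg⟩ := hsome
    rw [hg]
    exact single_eq g
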